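-- pv_equiv track=rewrite | github.com/barfet/AI_Recruiter | src/services/job_discovery.py | _get_skill_variations
-- ===== SOURCE A (Python) =====
-- from typing import Dict, List, Optional, Tuple, Any
--
-- def _get_skill_variations(skill: str) -> List[str]:
--     """Get common variations of a skill."""
--     variations_map = {
--         "python": ["python3", "python2", "py"],
--         "javascript": ["js", "ecmascript", "node.js", "nodejs"],
--         "machine learning": ["ml", "deep learning", "ai", "artificial intelligence"],
--         "aws": ["amazon web services", "aws cloud", "amazon cloud"],
--         "docker": ["containerization", "containers", "docker container"],
--         "kubernetes": ["k8s", "container orchestration"],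
--         "react": ["reactjs", "react.js"],
--         "angular": ["angularjs", "angular.js"],
--         "vue": ["vuejs", "vue.js"],
--         "devops": ["devsecops", "dev ops", "development operations"],
--         "ci/cd": ["continuous integration", "continuous deployment", "cicd"],
--         "git": ["github", "gitlab", "version control"],
--         "sql": ["mysql", "postgresql", "oracle", "database"],
--         "nosql": ["mongodb", "dynamodb", "cassandra"],
--         "rest": ["rest api", "restful", "web services"],
--         "graphql": ["gql", "graph ql"],
--         "java": ["jvm", "j2ee", "spring"],
--         "c#": ["csharp", ".net", "dotnet"],
--         "c++": ["cpp", "cplusplus"],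
--         "go": ["golang"],
--         "ruby": ["ruby on rails", "rails"],
--         "php": ["laravel", "symfony"],
--         "scala": ["apache spark", "spark"],
--         "swift": ["ios development", "ios"],
--         "kotlin": ["android development", "android"],
--         "rust": ["rustlang"],
--         "typescript": ["ts"],
--         "html": ["html5"],
--         "css": ["css3", "scss", "sass"],
--         "linux": ["unix", "bash", "shell scripting"],
--         "agile": ["scrum", "kanban", "lean"],
--         "frontend": ["front-end", "front end", "client side"],
--         "backend": ["back-end", "back end", "server side"],
--         "fullstack": ["full-stack", "full stack"],
--         "testing": ["qa", "quality assurance", "test automation"],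
--         "security": ["cybersecurity", "infosec", "information security"],
--         "cloud": ["cloud computing", "cloud architecture"],
--         "microservices": ["service oriented architecture", "soa"],
--         "blockchain": ["web3", "cryptocurrency", "crypto"],
--         "data science": ["data analytics", "data analysis", "statistics"],
--         "big data": ["hadoop", "spark", "data engineering"],
--         "nlp": ["natural language processing", "text analytics"],
--         "computer vision": ["cv", "image processing", "opencv"],
--         "mobile": ["mobile development", "app development"],
--         "web": ["web development", "web design"],
--         "ui": ["user interface", "ux/ui"],
--         "ux": ["user experience", "usability"],
--         "api": ["api development", "web services"],
--         "serverless": ["faas", "function as a service"],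
--         "networking": ["tcp/ip", "network security"],
--         "architecture": ["system design", "software architecture"],
--     }
--
--     skill = skill.lower()
--     variations = [skill]
--
--     # Add direct variations
--     if skill in variations_map:
--         variations.extend(variations_map[skill])
--
--     # Add reverse lookup
--     for main_skill, skill_variations in variations_map.items():
--         if skill in skill_variations:
--             variations.extend([main_skill] + skill_variations)
--
--     return list(set(variations))
-- ===== SOURCE B (Python) =====
-- from typing import Dict, List, Optional, Tuple, Any
--
-- # Precomputed inverted index (generated once from A's variations_map): every term
-- # (main key or variation) maps to the full list of terms A would append for it.
-- _SKILL_INDEX = {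
--     'python': ['python3', 'python2', 'py'],
--     'javascript': ['js', 'ecmascript', 'node.js', 'nodejs'],
--     'machine learning': ['ml', 'deep learning', 'ai', 'artificial intelligence'],
--     'aws': ['amazon web services', 'aws cloud', 'amazon cloud'],
--     'docker': ['containerization', 'containers', 'docker container'],
--     'kubernetes': ['k8s', 'container orchestration'],
--     'react': ['reactjs', 'react.js'],
--     'angular': ['angularjs', 'angular.js'],
--     'vue': ['vuejs', 'vue.js'],
--     'devops': ['devsecops', 'dev ops', 'development operations'],
--     'ci/cd': ['continuous integration', 'continuous deployment', 'cicd'],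
--     'git': ['github', 'gitlab', 'version control'],
--     'sql': ['mysql', 'postgresql', 'oracle', 'database'],
--     'nosql': ['mongodb', 'dynamodb', 'cassandra'],
--     'rest': ['rest api', 'restful', 'web services'],
--     'graphql': ['gql', 'graph ql'],
--     'java': ['jvm', 'j2ee', 'spring'],
--     'c#': ['csharp', '.net', 'dotnet'],
--     'c++': ['cpp', 'cplusplus'],
--     'go': ['golang'],
--     'ruby': ['ruby on rails', 'rails'],
--     'php': ['laravel', 'symfony'],
--     'scala': ['apache spark', 'spark'],
--     'swift': ['ios development', 'ios'],
--     'kotlin': ['android development', 'android'],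
--     'rust': ['rustlang'],
--     'typescript': ['ts'],
--     'html': ['html5'],
--     'css': ['css3', 'scss', 'sass'],
--     'linux': ['unix', 'bash', 'shell scripting'],
--     'agile': ['scrum', 'kanban', 'lean'],
--     'frontend': ['front-end', 'front end', 'client side'],
--     'backend': ['back-end', 'back end', 'server side'],
--     'fullstack': ['full-stack', 'full stack'],
--     'testing': ['qa', 'quality assurance', 'test automation'],
--     'security': ['cybersecurity', 'infosec', 'information security'],
--     'cloud': ['cloud computing', 'cloud architecture'],
--     'microservices': ['service oriented architecture', 'soa'],
--     'blockchain': ['web3', 'cryptocurrency', 'crypto'],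
--     'data science': ['data analytics', 'data analysis', 'statistics'],
--     'big data': ['hadoop', 'spark', 'data engineering'],
--     'nlp': ['natural language processing', 'text analytics'],
--     'computer vision': ['cv', 'image processing', 'opencv'],
--     'mobile': ['mobile development', 'app development'],
--     'web': ['web development', 'web design'],
--     'ui': ['user interface', 'ux/ui'],
--     'ux': ['user experience', 'usability'],
--     'api': ['api development', 'web services'],
--     'serverless': ['faas', 'function as a service'],
--     'networking': ['tcp/ip', 'network security'],
--     'architecture': ['system design', 'software architecture'],
--     'python3': ['python', 'python3', 'python2', 'py'],
--     'python2': ['python', 'python3', 'python2', 'py'],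
--     'py': ['python', 'python3', 'python2', 'py'],
--     'js': ['javascript', 'js', 'ecmascript', 'node.js', 'nodejs'],
--     'ecmascript': ['javascript', 'js', 'ecmascript', 'node.js', 'nodejs'],
--     'node.js': ['javascript', 'js', 'ecmascript', 'node.js', 'nodejs'],
--     'nodejs': ['javascript', 'js', 'ecmascript', 'node.js', 'nodejs'],
--     'ml': ['machine learning', 'ml', 'deep learning', 'ai', 'artificial intelligence'],
--     'deep learning': ['machine learning', 'ml', 'deep learning', 'ai', 'artificial intelligence'],
--     'ai': ['machine learning', 'ml', 'deep learning', 'ai', 'artificial intelligence'],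
--     'artificial intelligence': ['machine learning', 'ml', 'deep learning', 'ai', 'artificial intelligence'],
--     'amazon web services': ['aws', 'amazon web services', 'aws cloud', 'amazon cloud'],
--     'aws cloud': ['aws', 'amazon web services', 'aws cloud', 'amazon cloud'],
--     'amazon cloud': ['aws', 'amazon web services', 'aws cloud', 'amazon cloud'],
--     'containerization': ['docker', 'containerization', 'containers', 'docker container'],
--     'containers': ['docker', 'containerization', 'containers', 'docker container'],
--     'docker container': ['docker', 'containerization', 'containers', 'docker container'],
--     'k8s': ['kubernetes', 'k8s', 'container orchestration'],
--     'container orchestration': ['kubernetes', 'k8s', 'container orchestration'],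
--     'reactjs': ['react', 'reactjs', 'react.js'],
--     'react.js': ['react', 'reactjs', 'react.js'],
--     'angularjs': ['angular', 'angularjs', 'angular.js'],
--     'angular.js': ['angular', 'angularjs', 'angular.js'],
--     'vuejs': ['vue', 'vuejs', 'vue.js'],
--     'vue.js': ['vue', 'vuejs', 'vue.js'],
--     'devsecops': ['devops', 'devsecops', 'dev ops', 'development operations'],
--     'dev ops': ['devops', 'devsecops', 'dev ops', 'development operations'],
--     'development operations': ['devops', 'devsecops', 'dev ops', 'development operations'],
--     'continuous integration': ['ci/cd', 'continuous integration', 'continuous deployment', 'cicd'],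
--     'continuous deployment': ['ci/cd', 'continuous integration', 'continuous deployment', 'cicd'],
--     'cicd': ['ci/cd', 'continuous integration', 'continuous deployment', 'cicd'],
--     'github': ['git', 'github', 'gitlab', 'version control'],
--     'gitlab': ['git', 'github', 'gitlab', 'version control'],
--     'version control': ['git', 'github', 'gitlab', 'version control'],
--     'mysql': ['sql', 'mysql', 'postgresql', 'oracle', 'database'],
--     'postgresql': ['sql', 'mysql', 'postgresql', 'oracle', 'database'],
--     'oracle': ['sql', 'mysql', 'postgresql', 'oracle', 'database'],
--     'database': ['sql', 'mysql', 'postgresql', 'oracle', 'database'],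
--     'mongodb': ['nosql', 'mongodb', 'dynamodb', 'cassandra'],
--     'dynamodb': ['nosql', 'mongodb', 'dynamodb', 'cassandra'],
--     'cassandra': ['nosql', 'mongodb', 'dynamodb', 'cassandra'],
--     'rest api': ['rest', 'rest api', 'restful', 'web services'],
--     'restful': ['rest', 'rest api', 'restful', 'web services'],
--     'web services': ['rest', 'rest api', 'restful', 'web services', 'api', 'api development', 'web services'],
--     'gql': ['graphql', 'gql', 'graph ql'],
--     'graph ql': ['graphql', 'gql', 'graph ql'],
--     'jvm': ['java', 'jvm', 'j2ee', 'spring'],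
--     'j2ee': ['java', 'jvm', 'j2ee', 'spring'],
--     'spring': ['java', 'jvm', 'j2ee', 'spring'],
--     'csharp': ['c#', 'csharp', '.net', 'dotnet'],
--     '.net': ['c#', 'csharp', '.net', 'dotnet'],
--     'dotnet': ['c#', 'csharp', '.net', 'dotnet'],
--     'cpp': ['c++', 'cpp', 'cplusplus'],
--     'cplusplus': ['c++', 'cpp', 'cplusplus'],
--     'golang': ['go', 'golang'],
--     'ruby on rails': ['ruby', 'ruby on rails', 'rails'],
--     'rails': ['ruby', 'ruby on rails', 'rails'],
--     'laravel': ['php', 'laravel', 'symfony'],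
--     'symfony': ['php', 'laravel', 'symfony'],
--     'apache spark': ['scala', 'apache spark', 'spark'],
--     'spark': ['scala', 'apache spark', 'spark', 'big data', 'hadoop', 'spark', 'data engineering'],
--     'ios development': ['swift', 'ios development', 'ios'],
--     'ios': ['swift', 'ios development', 'ios'],
--     'android development': ['kotlin', 'android development', 'android'],
--     'android': ['kotlin', 'android development', 'android'],
--     'rustlang': ['rust', 'rustlang'],
--     'ts': ['typescript', 'ts'],
--     'html5': ['html', 'html5'],
--     'css3': ['css', 'css3', 'scss', 'sass'],
--     'scss': ['css', 'css3', 'scss', 'sass'],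
--     'sass': ['css', 'css3', 'scss', 'sass'],
--     'unix': ['linux', 'unix', 'bash', 'shell scripting'],
--     'bash': ['linux', 'unix', 'bash', 'shell scripting'],
--     'shell scripting': ['linux', 'unix', 'bash', 'shell scripting'],
--     'scrum': ['agile', 'scrum', 'kanban', 'lean'],
--     'kanban': ['agile', 'scrum', 'kanban', 'lean'],
--     'lean': ['agile', 'scrum', 'kanban', 'lean'],
--     'front-end': ['frontend', 'front-end', 'front end', 'client side'],
--     'front end': ['frontend', 'front-end', 'front end', 'client side'],
--     'client side': ['frontend', 'front-end', 'front end', 'client side'],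
--     'back-end': ['backend', 'back-end', 'back end', 'server side'],
--     'back end': ['backend', 'back-end', 'back end', 'server side'],
--     'server side': ['backend', 'back-end', 'back end', 'server side'],
--     'full-stack': ['fullstack', 'full-stack', 'full stack'],
--     'full stack': ['fullstack', 'full-stack', 'full stack'],
--     'qa': ['testing', 'qa', 'quality assurance', 'test automation'],
--     'quality assurance': ['testing', 'qa', 'quality assurance', 'test automation'],
--     'test automation': ['testing', 'qa', 'quality assurance', 'test automation'],
--     'cybersecurity': ['security', 'cybersecurity', 'infosec', 'information security'],
--     'infosec': ['security', 'cybersecurity', 'infosec', 'information security'],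
--     'information security': ['security', 'cybersecurity', 'infosec', 'information security'],
--     'cloud computing': ['cloud', 'cloud computing', 'cloud architecture'],
--     'cloud architecture': ['cloud', 'cloud computing', 'cloud architecture'],
--     'service oriented architecture': ['microservices', 'service oriented architecture', 'soa'],
--     'soa': ['microservices', 'service oriented architecture', 'soa'],
--     'web3': ['blockchain', 'web3', 'cryptocurrency', 'crypto'],
--     'cryptocurrency': ['blockchain', 'web3', 'cryptocurrency', 'crypto'],
--     'crypto': ['blockchain', 'web3', 'cryptocurrency', 'crypto'],
--     'data analytics': ['data science', 'data analytics', 'data analysis', 'statistics'],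
--     'data analysis': ['data science', 'data analytics', 'data analysis', 'statistics'],
--     'statistics': ['data science', 'data analytics', 'data analysis', 'statistics'],
--     'hadoop': ['big data', 'hadoop', 'spark', 'data engineering'],
--     'data engineering': ['big data', 'hadoop', 'spark', 'data engineering'],
--     'natural language processing': ['nlp', 'natural language processing', 'text analytics'],
--     'text analytics': ['nlp', 'natural language processing', 'text analytics'],
--     'cv': ['computer vision', 'cv', 'image processing', 'opencv'],
--     'image processing': ['computer vision', 'cv', 'image processing', 'opencv'],
--     'opencv': ['computer vision', 'cv', 'image processing', 'opencv'],
--     'mobile development': ['mobile', 'mobile development', 'app development'],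
--     'app development': ['mobile', 'mobile development', 'app development'],
--     'web development': ['web', 'web development', 'web design'],
--     'web design': ['web', 'web development', 'web design'],
--     'user interface': ['ui', 'user interface', 'ux/ui'],
--     'ux/ui': ['ui', 'user interface', 'ux/ui'],
--     'user experience': ['ux', 'user experience', 'usability'],
--     'usability': ['ux', 'user experience', 'usability'],
--     'api development': ['api', 'api development', 'web services'],
--     'faas': ['serverless', 'faas', 'function as a service'],
--     'function as a service': ['serverless', 'faas', 'function as a service'],
--     'tcp/ip': ['networking', 'tcp/ip', 'network security'],
--     'network security': ['networking', 'tcp/ip', 'network security'],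
--     'system design': ['architecture', 'system design', 'software architecture'],
--     'software architecture': ['architecture', 'system design', 'software architecture'],
-- }
--
--
-- def _get_skill_variations(skill: str) -> List[str]:
--     """Get common variations of a skill via one lookup in the precomputed inverted index."""
--     skill = skill.lower()
--     return list(set([skill] + _SKILL_INDEX.get(skill, [])))
-- ===== Notes on version B (the rewrite author's own statement) =====
-- stated objective: faster
-- what changed: B replaces A's per-call reverse scan over every variation group with a single lookup skill -> variations in a precomputed inverted-index dict (generated once from the map), so a call is lowercase + one dict lookup.
import Mathlib
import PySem

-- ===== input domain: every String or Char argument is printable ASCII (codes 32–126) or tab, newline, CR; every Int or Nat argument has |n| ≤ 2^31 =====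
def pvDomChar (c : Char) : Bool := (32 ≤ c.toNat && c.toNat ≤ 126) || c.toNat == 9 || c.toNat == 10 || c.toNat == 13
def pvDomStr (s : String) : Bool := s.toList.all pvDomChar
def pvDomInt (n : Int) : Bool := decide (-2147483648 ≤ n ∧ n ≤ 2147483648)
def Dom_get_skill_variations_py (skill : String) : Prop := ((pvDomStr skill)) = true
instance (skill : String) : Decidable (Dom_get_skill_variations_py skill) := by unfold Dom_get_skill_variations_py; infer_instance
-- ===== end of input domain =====

-- B replaces A's per-call reverse scan over the whole variations map by a single lookup in a
-- precomputed inverted index (a literal association list generated once from the same map):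
-- objective faster per call by a constant-factor mechanism. Both programs end in Python's
-- list(set(...)), whose iteration order is hash order and is not modelled: both ports end in
-- PySem.Set.ofList, i.e. the result is exact as a finite set.

-- ===== PORT A =====
def pvVmap : List (String × List String) := [
  ("python", ["python3", "python2", "py"]),
  ("javascript", ["js", "ecmascript", "node.js", "nodejs"]),
  ("machine learning", ["ml", "deep learning", "ai", "artificial intelligence"]),
  ("aws", ["amazon web services", "aws cloud", "amazon cloud"]),
  ("docker", ["containerization", "containers", "docker container"]),
  ("kubernetes", ["k8s", "container orchestration"]),
  ("react", ["reactjs", "react.js"]),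
  ("angular", ["angularjs", "angular.js"]),
  ("vue", ["vuejs", "vue.js"]),
  ("devops", ["devsecops", "dev ops", "development operations"]),
  ("ci/cd", ["continuous integration", "continuous deployment", "cicd"]),
  ("git", ["github", "gitlab", "version control"]),
  ("sql", ["mysql", "postgresql", "oracle", "database"]),
  ("nosql", ["mongodb", "dynamodb", "cassandra"]),
  ("rest", ["rest api", "restful", "web services"]),
  ("graphql", ["gql", "graph ql"]),
  ("java", ["jvm", "j2ee", "spring"]),
  ("c#", ["csharp", ".net", "dotnet"]),
  ("c++", ["cpp", "cplusplus"]),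
  ("go", ["golang"]),
  ("ruby", ["ruby on rails", "rails"]),
  ("php", ["laravel", "symfony"]),
  ("scala", ["apache spark", "spark"]),
  ("swift", ["ios development", "ios"]),
  ("kotlin", ["android development", "android"]),
  ("rust", ["rustlang"]),
  ("typescript", ["ts"]),
  ("html", ["html5"]),
  ("css", ["css3", "scss", "sass"]),
  ("linux", ["unix", "bash", "shell scripting"]),
  ("agile", ["scrum", "kanban", "lean"]),
  ("frontend", ["front-end", "front end", "client side"]),
  ("backend", ["back-end", "back end", "server side"]),
  ("fullstack", ["full-stack", "full stack"]),
  ("testing", ["qa", "quality assurance", "test automation"]),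
  ("security", ["cybersecurity", "infosec", "information security"]),
  ("cloud", ["cloud computing", "cloud architecture"]),
  ("microservices", ["service oriented architecture", "soa"]),
  ("blockchain", ["web3", "cryptocurrency", "crypto"]),
  ("data science", ["data analytics", "data analysis", "statistics"]),
  ("big data", ["hadoop", "spark", "data engineering"]),
  ("nlp", ["natural language processing", "text analytics"]),
  ("computer vision", ["cv", "image processing", "opencv"]),
  ("mobile", ["mobile development", "app development"]),
  ("web", ["web development", "web design"]),
  ("ui", ["user interface", "ux/ui"]),
  ("ux", ["user experience", "usability"]),
  ("api", ["api development", "web services"]),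
  ("serverless", ["faas", "function as a service"]),
  ("networking", ["tcp/ip", "network security"]),
  ("architecture", ["system design", "software architecture"])
]

def get_skill_variations_py (skill : String) : List String :=
  let skill := PySem.Str.lower skill
  let variations_map := PySem.Dict.mk pvVmap
  let variations : List String := [skill]
  -- if skill in variations_map: variations.extend(variations_map[skill])
  let variations :=
    match variations_map.get? skill with
    | some vs => variations ++ vs
    | none => variations
  -- for main_skill, skill_variations in variations_map.items(): if skill in skill_variations: ...
  let variations := variations_map.items.foldl
    (fun acc p => if p.2.contains skill then acc ++ ([p.1] ++ p.2) else acc) variations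
  PySem.Set.ofList variations

-- ===== PORT B =====
-- _SKILL_INDEX: the precomputed inverted index literal from Source B
def pvIndexLit : List (String × List String) := [
  ("python", ["python3", "python2", "py"]),
  ("javascript", ["js", "ecmascript", "node.js", "nodejs"]),
  ("machine learning", ["ml", "deep learning", "ai", "artificial intelligence"]),
  ("aws", ["amazon web services", "aws cloud", "amazon cloud"]),
  ("docker", ["containerization", "containers", "docker container"]),
  ("kubernetes", ["k8s", "container orchestration"]),
  ("react", ["reactjs", "react.js"]),
  ("angular", ["angularjs", "angular.js"]),
  ("vue", ["vuejs", "vue.js"]),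
  ("devops", ["devsecops", "dev ops", "development operations"]),
  ("ci/cd", ["continuous integration", "continuous deployment", "cicd"]),
  ("git", ["github", "gitlab", "version control"]),
  ("sql", ["mysql", "postgresql", "oracle", "database"]),
  ("nosql", ["mongodb", "dynamodb", "cassandra"]),
  ("rest", ["rest api", "restful", "web services"]),
  ("graphql", ["gql", "graph ql"]),
  ("java", ["jvm", "j2ee", "spring"]),
  ("c#", ["csharp", ".net", "dotnet"]),
  ("c++", ["cpp", "cplusplus"]),
  ("go", ["golang"]),
  ("ruby", ["ruby on rails", "rails"]),
  ("php", ["laravel", "symfony"]),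
  ("scala", ["apache spark", "spark"]),
  ("swift", ["ios development", "ios"]),
  ("kotlin", ["android development", "android"]),
  ("rust", ["rustlang"]),
  ("typescript", ["ts"]),
  ("html", ["html5"]),
  ("css", ["css3", "scss", "sass"]),
  ("linux", ["unix", "bash", "shell scripting"]),
  ("agile", ["scrum", "kanban", "lean"]),
  ("frontend", ["front-end", "front end", "client side"]),
  ("backend", ["back-end", "back end", "server side"]),
  ("fullstack", ["full-stack", "full stack"]),
  ("testing", ["qa", "quality assurance", "test automation"]),
  ("security", ["cybersecurity", "infosec", "information security"]),
  ("cloud", ["cloud computing", "cloud architecture"]),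
  ("microservices", ["service oriented architecture", "soa"]),
  ("blockchain", ["web3", "cryptocurrency", "crypto"]),
  ("data science", ["data analytics", "data analysis", "statistics"]),
  ("big data", ["hadoop", "spark", "data engineering"]),
  ("nlp", ["natural language processing", "text analytics"]),
  ("computer vision", ["cv", "image processing", "opencv"]),
  ("mobile", ["mobile development", "app development"]),
  ("web", ["web development", "web design"]),
  ("ui", ["user interface", "ux/ui"]),
  ("ux", ["user experience", "usability"]),
  ("api", ["api development", "web services"]),
  ("serverless", ["faas", "function as a service"]),
  ("networking", ["tcp/ip", "network security"]),
  ("architecture", ["system design", "software architecture"]),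
  ("python3", ["python", "python3", "python2", "py"]),
  ("python2", ["python", "python3", "python2", "py"]),
  ("py", ["python", "python3", "python2", "py"]),
  ("js", ["javascript", "js", "ecmascript", "node.js", "nodejs"]),
  ("ecmascript", ["javascript", "js", "ecmascript", "node.js", "nodejs"]),
  ("node.js", ["javascript", "js", "ecmascript", "node.js", "nodejs"]),
  ("nodejs", ["javascript", "js", "ecmascript", "node.js", "nodejs"]),
  ("ml", ["machine learning", "ml", "deep learning", "ai", "artificial intelligence"]),
  ("deep learning", ["machine learning", "ml", "deep learning", "ai", "artificial intelligence"]),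
  ("ai", ["machine learning", "ml", "deep learning", "ai", "artificial intelligence"]),
  ("artificial intelligence", ["machine learning", "ml", "deep learning", "ai", "artificial intelligence"]),
  ("amazon web services", ["aws", "amazon web services", "aws cloud", "amazon cloud"]),
  ("aws cloud", ["aws", "amazon web services", "aws cloud", "amazon cloud"]),
  ("amazon cloud", ["aws", "amazon web services", "aws cloud", "amazon cloud"]),
  ("containerization", ["docker", "containerization", "containers", "docker container"]),
  ("containers", ["docker", "containerization", "containers", "docker container"]),
  ("docker container", ["docker", "containerization", "containers", "docker container"]),
  ("k8s", ["kubernetes", "k8s", "container orchestration"]),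
  ("container orchestration", ["kubernetes", "k8s", "container orchestration"]),
  ("reactjs", ["react", "reactjs", "react.js"]),
  ("react.js", ["react", "reactjs", "react.js"]),
  ("angularjs", ["angular", "angularjs", "angular.js"]),
  ("angular.js", ["angular", "angularjs", "angular.js"]),
  ("vuejs", ["vue", "vuejs", "vue.js"]),
  ("vue.js", ["vue", "vuejs", "vue.js"]),
  ("devsecops", ["devops", "devsecops", "dev ops", "development operations"]),
  ("dev ops", ["devops", "devsecops", "dev ops", "development operations"]),
  ("development operations", ["devops", "devsecops", "dev ops", "development operations"]),
  ("continuous integration", ["ci/cd", "continuous integration", "continuous deployment", "cicd"]),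
  ("continuous deployment", ["ci/cd", "continuous integration", "continuous deployment", "cicd"]),
  ("cicd", ["ci/cd", "continuous integration", "continuous deployment", "cicd"]),
  ("github", ["git", "github", "gitlab", "version control"]),
  ("gitlab", ["git", "github", "gitlab", "version control"]),
  ("version control", ["git", "github", "gitlab", "version control"]),
  ("mysql", ["sql", "mysql", "postgresql", "oracle", "database"]),
  ("postgresql", ["sql", "mysql", "postgresql", "oracle", "database"]),
  ("oracle", ["sql", "mysql", "postgresql", "oracle", "database"]),
  ("database", ["sql", "mysql", "postgresql", "oracle", "database"]),
  ("mongodb", ["nosql", "mongodb", "dynamodb", "cassandra"]),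
  ("dynamodb", ["nosql", "mongodb", "dynamodb", "cassandra"]),
  ("cassandra", ["nosql", "mongodb", "dynamodb", "cassandra"]),
  ("rest api", ["rest", "rest api", "restful", "web services"]),
  ("restful", ["rest", "rest api", "restful", "web services"]),
  ("web services", ["rest", "rest api", "restful", "web services", "api", "api development", "web services"]),
  ("gql", ["graphql", "gql", "graph ql"]),
  ("graph ql", ["graphql", "gql", "graph ql"]),
  ("jvm", ["java", "jvm", "j2ee", "spring"]),
  ("j2ee", ["java", "jvm", "j2ee", "spring"]),
  ("spring", ["java", "jvm", "j2ee", "spring"]),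
  ("csharp", ["c#", "csharp", ".net", "dotnet"]),
  (".net", ["c#", "csharp", ".net", "dotnet"]),
  ("dotnet", ["c#", "csharp", ".net", "dotnet"]),
  ("cpp", ["c++", "cpp", "cplusplus"]),
  ("cplusplus", ["c++", "cpp", "cplusplus"]),
  ("golang", ["go", "golang"]),
  ("ruby on rails", ["ruby", "ruby on rails", "rails"]),
  ("rails", ["ruby", "ruby on rails", "rails"]),
  ("laravel", ["php", "laravel", "symfony"]),
  ("symfony", ["php", "laravel", "symfony"]),
  ("apache spark", ["scala", "apache spark", "spark"]),
  ("spark", ["scala", "apache spark", "spark", "big data", "hadoop", "spark", "data engineering"]),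
  ("ios development", ["swift", "ios development", "ios"]),
  ("ios", ["swift", "ios development", "ios"]),
  ("android development", ["kotlin", "android development", "android"]),
  ("android", ["kotlin", "android development", "android"]),
  ("rustlang", ["rust", "rustlang"]),
  ("ts", ["typescript", "ts"]),
  ("html5", ["html", "html5"]),
  ("css3", ["css", "css3", "scss", "sass"]),
  ("scss", ["css", "css3", "scss", "sass"]),
  ("sass", ["css", "css3", "scss", "sass"]),
  ("unix", ["linux", "unix", "bash", "shell scripting"]),
  ("bash", ["linux", "unix", "bash", "shell scripting"]),
  ("shell scripting", ["linux", "unix", "bash", "shell scripting"]),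
  ("scrum", ["agile", "scrum", "kanban", "lean"]),
  ("kanban", ["agile", "scrum", "kanban", "lean"]),
  ("lean", ["agile", "scrum", "kanban", "lean"]),
  ("front-end", ["frontend", "front-end", "front end", "client side"]),
  ("front end", ["frontend", "front-end", "front end", "client side"]),
  ("client side", ["frontend", "front-end", "front end", "client side"]),
  ("back-end", ["backend", "back-end", "back end", "server side"]),
  ("back end", ["backend", "back-end", "back end", "server side"]),
  ("server side", ["backend", "back-end", "back end", "server side"]),
  ("full-stack", ["fullstack", "full-stack", "full stack"]),
  ("full stack", ["fullstack", "full-stack", "full stack"]),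
  ("qa", ["testing", "qa", "quality assurance", "test automation"]),
  ("quality assurance", ["testing", "qa", "quality assurance", "test automation"]),
  ("test automation", ["testing", "qa", "quality assurance", "test automation"]),
  ("cybersecurity", ["security", "cybersecurity", "infosec", "information security"]),
  ("infosec", ["security", "cybersecurity", "infosec", "information security"]),
  ("information security", ["security", "cybersecurity", "infosec", "information security"]),
  ("cloud computing", ["cloud", "cloud computing", "cloud architecture"]),
  ("cloud architecture", ["cloud", "cloud computing", "cloud architecture"]),
  ("service oriented architecture", ["microservices", "service oriented architecture", "soa"]),
  ("soa", ["microservices", "service oriented architecture", "soa"]),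
  ("web3", ["blockchain", "web3", "cryptocurrency", "crypto"]),
  ("cryptocurrency", ["blockchain", "web3", "cryptocurrency", "crypto"]),
  ("crypto", ["blockchain", "web3", "cryptocurrency", "crypto"]),
  ("data analytics", ["data science", "data analytics", "data analysis", "statistics"]),
  ("data analysis", ["data science", "data analytics", "data analysis", "statistics"]),
  ("statistics", ["data science", "data analytics", "data analysis", "statistics"]),
  ("hadoop", ["big data", "hadoop", "spark", "data engineering"]),
  ("data engineering", ["big data", "hadoop", "spark", "data engineering"]),
  ("natural language processing", ["nlp", "natural language processing", "text analytics"]),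
  ("text analytics", ["nlp", "natural language processing", "text analytics"]),
  ("cv", ["computer vision", "cv", "image processing", "opencv"]),
  ("image processing", ["computer vision", "cv", "image processing", "opencv"]),
  ("opencv", ["computer vision", "cv", "image processing", "opencv"]),
  ("mobile development", ["mobile", "mobile development", "app development"]),
  ("app development", ["mobile", "mobile development", "app development"]),
  ("web development", ["web", "web development", "web design"]),
  ("web design", ["web", "web development", "web design"]),
  ("user interface", ["ui", "user interface", "ux/ui"]),
  ("ux/ui", ["ui", "user interface", "ux/ui"]),
  ("user experience", ["ux", "user experience", "usability"]),
  ("usability", ["ux", "user experience", "usability"]),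
  ("api development", ["api", "api development", "web services"]),
  ("faas", ["serverless", "faas", "function as a service"]),
  ("function as a service", ["serverless", "faas", "function as a service"]),
  ("tcp/ip", ["networking", "tcp/ip", "network security"]),
  ("network security", ["networking", "tcp/ip", "network security"]),
  ("system design", ["architecture", "system design", "software architecture"]),
  ("software architecture", ["architecture", "system design", "software architecture"])
]


def get_skill_variations_py_alt (skill : String) : List String :=
  let skill := PySem.Str.lower skill
  PySem.Set.ofList ([skill] ++ (PySem.Dict.mk pvIndexLit).getD skill [])

-- ===== PRECONDITION & SPEC =====
def Spec_get_skill_variations_py (skill : String) (out : List String) : Prop := out = get_skill_variations_py_alt skill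
instance (skill : String) (out : List String) : Decidable (Spec_get_skill_variations_py skill out) := by unfold Spec_get_skill_variations_py; infer_instance

-- ===== CLAIM (what is proved, stated in full; the proofs are below) =====
def Claim_equal_get_skill_variations_py : Prop := ∀ (skill : String), Dom_get_skill_variations_py skill → Spec_get_skill_variations_py skill (get_skill_variations_py skill)

-- ===== LEMMAS AND PROOFS =====

-- Proof-side reconstruction of the index from A's map (B itself only carries the literal):
-- index.setdefault(k, []).extend(xs)
def pvExtendAt (d : PySem.Dict String (List String)) (k : String) (xs : List String) :
    PySem.Dict String (List String) :=
  d.insert k (d.getD k [] ++ xs)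

-- the generator behind pvIndexLit: two passes over the map, accumulating per-term contributions
def pvBuildIndex : PySem.Dict String (List String) :=
  let m := PySem.Dict.mk pvVmap
  let index := m.items.foldl (fun d p => pvExtendAt d p.1 p.2) PySem.Dict.empty
  m.items.foldl (fun d p => p.2.foldl (fun d v => pvExtendAt d v ([p.1] ++ p.2)) d) index

-- the literal B carries is exactly the generated index
set_option maxRecDepth 40000 in
theorem pvIndexLit_eq : PySem.Dict.mk pvIndexLit = pvBuildIndex := by decide

-- getD after one setdefault-extend step
theorem pvExtendAt_getD (d : PySem.Dict String (List String)) (k s : String) (xs : List String) :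
    (pvExtendAt d k xs).getD s [] = d.getD s [] ++ (if s = k then xs else []) := by
  simp only [pvExtendAt, PySem.Dict.getD_insert]
  by_cases h : s = k <;> simp [h]

-- getD after a whole pass of setdefault-extend steps
theorem pvPass_getD (l : List (String × List String)) (d : PySem.Dict String (List String))
    (s : String) :
    (l.foldl (fun d p => pvExtendAt d p.1 p.2) d).getD s [] =
      d.getD s [] ++ (l.filter (fun p => p.1 == s)).flatMap (fun p => p.2) := by
  induction l generalizing d with
  | nil => simp
  | cons p rest ih =>
      simp only [List.foldl_cons, ih, pvExtendAt_getD, List.filter_cons]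
      by_cases h : p.1 = s
      · subst h; simp [List.append_assoc]
      · simp [h, show ¬ (s = p.1) from fun he => h he.symm]

-- the nested pass-2 loop is a pass of setdefault-extend steps over the flattened pairs
theorem pvPass2_flatten (l : List (String × List String)) (d : PySem.Dict String (List String)) :
    l.foldl (fun d p => p.2.foldl (fun d v => pvExtendAt d v ([p.1] ++ p.2)) d) d =
      (l.flatMap (fun p => p.2.map (fun v => (v, [p.1] ++ p.2)))).foldl
        (fun d e => pvExtendAt d e.1 e.2) d := by
  induction l generalizing d with
  | nil => rfl
  | cons p rest ih =>
      simp only [List.foldl_cons, List.flatMap_cons, List.foldl_append, List.foldl_map, ih]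

-- a Nodup list filtered for equality with s
theorem pvFilter_eq_of_nodup (vs : List String) (s : String) (h : vs.Nodup) :
    vs.filter (fun v => v == s) = if vs.contains s then [s] else [] := by
  induction vs with
  | nil => simp
  | cons v rest ih =>
      rcases List.nodup_cons.mp h with ⟨hv, hrest⟩
      by_cases hs : v = s
      · subst hs
        have hnil : rest.filter (fun x => x == v) = [] :=
          List.filter_eq_nil_iff.mpr (fun x hx => by
            simp only [beq_iff_eq]; rintro rfl; exact hv hx)
        simp [hnil]
      · simp [hs, ih hrest, Ne.symm hs]

theorem pvFilter_none_of_not_mem (l : List (String × List String)) (s : String)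
    (h : s ∉ l.map Prod.fst) : l.filter (fun p => p.1 == s) = [] := by
  apply List.filter_eq_nil_iff.mpr
  intro p hp
  simp only [beq_iff_eq]
  intro he
  exact h (List.mem_map.mpr ⟨p, hp, he⟩)

-- pass 1 contributions = the dict lookup A performs, given unique keys
theorem pvF1_eq_get? (l : List (String × List String)) (s : String)
    (h : (l.map Prod.fst).Nodup) :
    (l.filter (fun p => p.1 == s)).flatMap (fun p => p.2) =
      ((PySem.Dict.mk l).get? s).getD [] := by
  induction l with
  | nil => simp [PySem.Dict.get?]
  | cons p rest ih =>
      rw [List.map_cons] at h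
      rcases List.nodup_cons.mp h with ⟨hp, hrest⟩
      rw [PySem.Dict.get?_mk_cons]
      by_cases he : p.1 = s
      · subst he
        simp [pvFilter_none_of_not_mem rest p.1 hp]
      · simp [he, ih hrest]

-- pass 2 contributions = A's reverse-lookup contributions, given duplicate-free groups
theorem pvF2_eq_reverse (l : List (String × List String)) (s : String)
    (h : ∀ p ∈ l, p.2.Nodup) :
    ((l.flatMap (fun p => p.2.map (fun v => (v, [p.1] ++ p.2)))).filter
        (fun e => e.1 == s)).flatMap (fun e => e.2) =
      (l.filter (fun p => p.2.contains s)).flatMap (fun p => [p.1] ++ p.2) := by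
  induction l with
  | nil => rfl
  | cons p rest ih =>
      have hh := h p (List.mem_cons_self ..)
      simp only [List.flatMap_cons, List.filter_append, List.flatMap_append,
        ih (fun q hq => h q (List.mem_cons_of_mem _ hq)), List.filter_cons]
      have hm : (p.2.map (fun v => (v, [p.1] ++ p.2))).filter (fun e => e.1 == s) =
          (p.2.filter (fun v => v == s)).map (fun v => (v, [p.1] ++ p.2)) := by
        rw [List.filter_map]; rfl
      rw [hm, pvFilter_eq_of_nodup p.2 s hh]
      by_cases hc : s ∈ p.2 <;> simp [hc]

-- A's reverse-lookup loop as filter + flatMap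
theorem pvRevLoop (l : List (String × List String)) (init : List String) (s : String) :
    l.foldl (fun acc p => if p.2.contains s then acc ++ ([p.1] ++ p.2) else acc) init =
      init ++ (l.filter (fun p => p.2.contains s)).flatMap (fun p => [p.1] ++ p.2) := by
  induction l generalizing init with
  | nil => simp
  | cons p rest ih =>
      rw [List.foldl_cons, List.filter_cons, ih]
      by_cases hc : s ∈ p.2 <;> simp [hc, List.append_assoc]

theorem pvVmap_keys_nodup : (pvVmap.map Prod.fst).Nodup := by decide

theorem pvVmap_groups_nodup : ∀ p ∈ pvVmap, p.2.Nodup := by decide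

-- the index lookup returns exactly A's direct ++ reverse contributions
theorem pvIndexLit_getD (s : String) :
    (PySem.Dict.mk pvIndexLit).getD s [] =
      ((PySem.Dict.mk pvVmap).get? s).getD [] ++
        (pvVmap.filter (fun p => p.2.contains s)).flatMap (fun p => [p.1] ++ p.2) := by
  rw [pvIndexLit_eq]
  show ((pvVmap.foldl (fun d p => p.2.foldl (fun d v => pvExtendAt d v ([p.1] ++ p.2)) d)
      (pvVmap.foldl (fun d p => pvExtendAt d p.1 p.2) PySem.Dict.empty))).getD s [] = _
  rw [pvPass2_flatten, pvPass_getD, pvPass_getD]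
  rw [pvF1_eq_get? pvVmap s pvVmap_keys_nodup, pvF2_eq_reverse pvVmap s pvVmap_groups_nodup]
  simp [PySem.Dict.empty, PySem.Dict.getD, PySem.Dict.get?]

-- ===== VERDICT (by name: the statement is the Claim_ definition above) =====
theorem get_skill_variations_py_spec : Claim_equal_get_skill_variations_py := by
  intro skill _
  show get_skill_variations_py skill = get_skill_variations_py_alt skill
  unfold get_skill_variations_py get_skill_variations_py_alt
  simp only [pvRevLoop, pvIndexLit_getD]
  cases h : (PySem.Dict.mk pvVmap).get? (PySem.Str.lower skill) with
  | none => simp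
  | some vs => simp
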